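-- pv_equiv track=rewrite | github.com/northstaraokeystone/gov-os | src/shieldproof/core/receipt.py | validate_receipt
-- ===== SOURCE A (Python) =====
-- def validate_receipt(receipt: dict) -> bool:
--     """
--     Validate receipt has required fields and valid hash.
--
--     Args:
--         receipt: Receipt dict to validate
--
--     Returns:
--         True if valid, False otherwise
--     """
--     required_fields = ["receipt_type", "ts", "tenant_id", "payload_hash"]
--
--     # Check required fields
--     for field in required_fields:
--         if field not in receipt:
--             return False
--
--     # Validate hash format (64 hex : 64 hex)
--     payload_hash = receipt.get("payload_hash", "")
--     if not isinstance(payload_hash, str) or ":" not in payload_hash: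
--         return False
--
--     parts = payload_hash.split(":")
--     if len(parts) != 2:
--         return False
--
--     # Each part should be 64 hex characters
--     for part in parts:
--         if len(part) != 64 or not all(c in '0123456789abcdef' for c in part):
--             return False
--
--     return True
-- ===== SOURCE B (Python) =====
-- def validate_receipt(receipt: dict) -> bool:
--     """Validate receipt has required fields and valid hash (64 hex ':' 64 hex)."""
--     required_fields = ["receipt_type", "ts", "tenant_id", "payload_hash"]
--     if any(field not in receipt for field in required_fields):
--         return False
--     h = receipt.get("payload_hash", "")
--     if not isinstance(h, str):
--         return False
--     # direct shape check: 129 chars, colon exactly at index 64, both halves hex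
--     return (len(h) == 129 and h[64] == ':'
--             and all(c in '0123456789abcdef' for c in h[:64])
--             and all(c in '0123456789abcdef' for c in h[65:]))
-- ===== Notes on version B (the rewrite author's own statement) =====
-- stated objective: simpler
-- what changed: Replaces A's colon-membership test, split(':'), parts-count check and per-part loop with one direct shape check: length 129, colon exactly at index 64, and a hex test on the two fixed 64-character slices.
import Mathlib
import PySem

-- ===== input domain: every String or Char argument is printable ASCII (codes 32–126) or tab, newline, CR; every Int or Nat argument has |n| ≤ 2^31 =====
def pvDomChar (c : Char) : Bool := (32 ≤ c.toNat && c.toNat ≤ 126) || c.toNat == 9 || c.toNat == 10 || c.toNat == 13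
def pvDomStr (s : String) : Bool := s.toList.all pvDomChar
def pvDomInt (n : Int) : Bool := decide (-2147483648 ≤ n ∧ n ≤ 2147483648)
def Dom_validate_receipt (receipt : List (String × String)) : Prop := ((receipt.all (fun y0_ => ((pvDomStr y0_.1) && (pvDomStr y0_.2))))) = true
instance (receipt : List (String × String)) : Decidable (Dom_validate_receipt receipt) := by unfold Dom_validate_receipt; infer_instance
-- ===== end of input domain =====

-- B replaces A's split(':')-and-scan hash validation by one direct shape check
-- (length 129, colon at index 64, hex on the two fixed slices); objective: simpler.

-- shared dict primitive: first-match lookup in the association list (Python 'k in d' / 'd.get(k, dflt)')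
def pvFirst? (receipt : List (String × String)) (k : String) : Option String :=
  (receipt.find? (fun kv => kv.1 == k)).map (·.2)

-- ===== PORT A =====
def validate_receipt (receipt : List (String × String)) : Bool :=
  let required_fields := ["receipt_type", "ts", "tenant_id", "payload_hash"]
  -- for field in required_fields: if field not in receipt: return False
  if required_fields.all (fun f => (pvFirst? receipt f).isSome) then
    let payload_hash := (pvFirst? receipt "payload_hash").getD ""
    -- isinstance(payload_hash, str) always holds under the String typing
    if PySem.Str.isIn ":" payload_hash then
      match PySem.Str.split? payload_hash ":" with
      | none => false  -- unreachable: ":" ≠ ""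
      | some parts =>
        if parts.length == 2 then
          -- for part in parts: if len(part) != 64 or not all(c in '0123456789abcdef' for c in part): return False
          parts.all (fun part =>
            PySem.Str.len part == 64 &&
            part.toList.all (fun c => "0123456789abcdef".toList.contains c))
        else false
    else false
  else false

-- ===== PORT B =====
def validate_receipt_alt (receipt : List (String × String)) : Bool :=
  let required_fields := ["receipt_type", "ts", "tenant_id", "payload_hash"]
  if required_fields.any (fun f => (pvFirst? receipt f).isNone) then false
  else
    let h := (pvFirst? receipt "payload_hash").getD ""
    -- isinstance(h, str) always holds under the String typing
    PySem.Str.len h == 129 && PySem.Str.pyGet? h 64 == some ':' &&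
      (PySem.Str.slice h none (some 64)).toList.all (fun c => "0123456789abcdef".toList.contains c) &&
      (PySem.Str.slice h (some 65) none).toList.all (fun c => "0123456789abcdef".toList.contains c)

-- ===== PRECONDITION & SPEC =====
def Spec_validate_receipt (receipt : List (String × String)) (out : Bool) : Prop := out = validate_receipt_alt receipt
instance (receipt : List (String × String)) (out : Bool) : Decidable (Spec_validate_receipt receipt out) := by unfold Spec_validate_receipt; infer_instance

-- ===== CLAIM (what is proved, stated in full; the proofs are below) =====
def Claim_equal_validate_receipt : Prop := ∀ (receipt : List (String × String)), Dom_validate_receipt receipt → Spec_validate_receipt receipt (validate_receipt receipt)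

-- ===== LEMMAS AND PROOFS =====

-- fuel-free form of PySem.Chars.splitOn for a single-character separator
def pvMsplit (c : Char) : List Char → List Char → List (List Char)
  | [], cur => [cur.reverse]
  | x :: rest, cur => if c = x then cur.reverse :: pvMsplit c rest [] else pvMsplit c rest (x :: cur)

theorem pv_go_eq (c : Char) (l : List Char) : ∀ (fuel : Nat) (cur : List Char)
    (acc : List (List Char)), l.length ≤ fuel →
    PySem.Chars.splitOn.go [c] fuel l cur acc = acc.reverse ++ pvMsplit c l cur := by
  induction l with
  | nil =>
    intro fuel cur acc _
    cases fuel <;> simp [PySem.Chars.splitOn.go, pvMsplit]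
  | cons x rest ih =>
    intro fuel cur acc hf
    cases fuel with
    | zero => simp at hf
    | succ f =>
      have hstep : PySem.Chars.splitOn.go [c] (f+1) (x :: rest) cur acc =
          if c = x then PySem.Chars.splitOn.go [c] f rest [] (cur.reverse :: acc)
          else PySem.Chars.splitOn.go [c] f rest (x :: cur) acc := by
        rw [PySem.Chars.splitOn.go]
        by_cases h : c = x <;> simp [List.isPrefixOf, h]
      have hlen : rest.length ≤ f := by simp at hf; omega
      by_cases h : c = x
      · subst h
        simp [hstep, ih f _ _ hlen, pvMsplit]
      · simp [hstep, h, ih f _ _ hlen, pvMsplit]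

theorem pv_splitOn_eq (c : Char) (l : List Char) :
    PySem.Chars.splitOn l [c] = pvMsplit c l [] := by
  have h : PySem.Chars.splitOn l [c] = PySem.Chars.splitOn.go [c] (l.length + 1) l [] [] := rfl
  rw [h, pv_go_eq c l (l.length + 1) [] [] (by omega)]
  simp

theorem pv_msplit_ne_nil (c : Char) : ∀ (l cur : List Char), pvMsplit c l cur ≠ [] := by
  intro l
  induction l with
  | nil => intro cur; simp [pvMsplit]
  | cons x rest ih =>
    intro cur
    by_cases h : c = x <;> simp [pvMsplit, h]
    · exact ih (x :: cur)

theorem pv_msplit_no_sep (c : Char) : ∀ (l cur : List Char), c ∉ l →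
    pvMsplit c l cur = [cur.reverse ++ l] := by
  intro l
  induction l with
  | nil => intro cur _; simp [pvMsplit]
  | cons x rest ih =>
    intro cur hm
    have hx : c ≠ x := fun h => hm (h ▸ List.mem_cons_self)
    have hr : c ∉ rest := fun h => hm (List.mem_cons_of_mem x h)
    simp [pvMsplit, hx, ih (x :: cur) hr]

theorem pv_msplit_split (c : Char) : ∀ (p q cur : List Char), c ∉ p →
    pvMsplit c (p ++ c :: q) cur = (cur.reverse ++ p) :: pvMsplit c q [] := by
  intro p
  induction p with
  | nil => intro q cur _; simp [pvMsplit]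
  | cons x rest ih =>
    intro q cur hm
    have hx : c ≠ x := fun h => hm (h ▸ List.mem_cons_self)
    have hr : c ∉ rest := fun h => hm (List.mem_cons_of_mem x h)
    simp [pvMsplit, hx, ih q (x :: cur) hr]

theorem pv_msplit_one (c : Char) : ∀ (l cur q : List Char), pvMsplit c l cur = [q] →
    q = cur.reverse ++ l ∧ c ∉ l := by
  intro l
  induction l with
  | nil => intro cur q h; simp [pvMsplit] at h; simp [h]
  | cons x rest ih =>
    intro cur q h
    by_cases hx : c = x
    · subst hx
      simp [pvMsplit] at h
      exact absurd h.2 (pv_msplit_ne_nil c rest [])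
    · simp only [pvMsplit, if_neg hx] at h
      obtain ⟨hq, hr⟩ := ih (x :: cur) q h
      refine ⟨by simpa using hq, ?_⟩
      simp [hx, hr]

theorem pv_msplit_two (c : Char) : ∀ (l cur p q : List Char), pvMsplit c l cur = [p, q] →
    ∃ p', p = cur.reverse ++ p' ∧ c ∉ p' ∧ c ∉ q ∧ l = p' ++ c :: q := by
  intro l
  induction l with
  | nil => intro cur p q h; simp [pvMsplit] at h
  | cons x rest ih =>
    intro cur p q h
    by_cases hx : c = x
    · subst hx
      simp [pvMsplit] at h
      obtain ⟨hq, hr⟩ := pv_msplit_one c rest [] q h.2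
      have hq' : q = rest := by simpa using hq
      exact ⟨[], by simp [h.1], by simp, hq' ▸ hr, by simp [hq']⟩
    · simp only [pvMsplit, if_neg hx] at h
      obtain ⟨p'', hp, hcp, hcq, hrest⟩ := ih (x :: cur) p q h
      refine ⟨x :: p'', by simpa using hp, ?_, hcq, by simp [hrest]⟩
      simp [hx, hcp]

-- the core fact: A's hash check equals B's direct shape check, on any string
theorem pv_hash_eq (h : String) :
    (if PySem.Str.isIn ":" h then
        match PySem.Str.split? h ":" with
        | none => false
        | some parts =>
          if parts.length == 2 then
            parts.all (fun part =>
              PySem.Str.len part == 64 &&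
              part.toList.all (fun c => "0123456789abcdef".toList.contains c))
          else false
      else false)
    = (PySem.Str.len h == 129 && PySem.Str.pyGet? h 64 == some ':' &&
        (PySem.Str.slice h none (some 64)).toList.all (fun c => "0123456789abcdef".toList.contains c) &&
        (PySem.Str.slice h (some 65) none).toList.all (fun c => "0123456789abcdef".toList.contains c)) := by
  have hsplit : PySem.Str.split? h ":" =
      some ((pvMsplit ':' h.toList []).map String.ofList) := by
    simp [PySem.Str.split?, PySem.Chars.split?]
    exact congrArg (List.map String.ofList) (pv_splitOn_eq ':' h.toList)
  rw [hsplit]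
  rw [Bool.eq_iff_iff]
  constructor
  · -- A's check → B's check
    intro hA
    split_ifs at hA with hin
    · simp only [beq_iff_eq] at hA
      split_ifs at hA with hlen2
      · have hlen2' : (pvMsplit ':' h.toList []).length = 2 := by simpa using hlen2
        obtain ⟨p, q, hpq⟩ := List.length_eq_two.mp hlen2'
        obtain ⟨p', hp', hcp, hcq, hdec⟩ := pv_msplit_two ':' h.toList [] p q hpq
        simp only [List.reverse_nil, List.nil_append] at hp'
        subst hp'
        rw [hpq] at hA
        simp only [List.map_cons, List.map_nil, List.all_cons, List.all_nil, Bool.and_true,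
          Bool.and_eq_true, beq_iff_eq, PySem.Str.len, String.toList_ofList] at hA
        obtain ⟨⟨hplen, hphex⟩, hqlen, hqhex⟩ := hA
        have hplen' : p.length = 64 := by exact_mod_cast hplen
        have hqlen' : q.length = 64 := by exact_mod_cast hqlen
        have hl129 : h.toList.length = 129 := by simp [hdec, hplen', hqlen']
        simp only [PySem.Str.len, PySem.Str.pyGet?, PySem.Str.toList_slice,
          PySem.Chars.slice_eq_listSlice, PySem.Chars.pyGet?_eq_listPyGet?,
          Bool.and_eq_true, beq_iff_eq]
        refine ⟨⟨⟨?_, ?_⟩, ?_⟩, ?_⟩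
        · exact_mod_cast hl129
        · have h64 : (64 : Int) = (p.length : Int) := by exact_mod_cast hplen.symm
          rw [hdec, h64, PySem.List.pyGet?_append_length]
        · rw [PySem.List.slice_to h.toList (by norm_num)]
          have ht : ((64 : Int)).toNat = p.length := by omega
          rw [ht, hdec, List.take_left' rfl]
          exact hphex
        · rw [PySem.List.slice_from h.toList (by norm_num)]
          have h65 : ((65 : Int)).toNat = (p ++ [':']).length := by simp [hplen']
          rw [h65, hdec]
          have hre : p ++ ':' :: q = (p ++ [':']) ++ q := by simp
          rw [hre, List.drop_left' rfl]
          exact hqhex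
  · -- B's check → A's check
    intro hB
    simp only [PySem.Str.len, PySem.Str.pyGet?, PySem.Str.toList_slice,
      PySem.Chars.slice_eq_listSlice, PySem.Chars.pyGet?_eq_listPyGet?,
      Bool.and_eq_true, beq_iff_eq] at hB
    obtain ⟨⟨⟨hlen, hget⟩, hphex⟩, hqhex⟩ := hB
    have hlen' : h.toList.length = 129 := by exact_mod_cast hlen
    rw [PySem.List.slice_to h.toList (by norm_num)] at hphex
    rw [PySem.List.slice_from h.toList (by norm_num)] at hqhex
    have h64 : (64 : Nat) < h.toList.length := by omega
    have hgetn : h.toList[(64 : Nat)] = ':' := by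
      rw [show ((64 : Int)) = (((64 : Nat) : Int)) from rfl, PySem.List.pyGet?_natCast] at hget
      rw [List.getElem?_eq_getElem h64] at hget
      exact Option.some.inj hget
    have hdec : h.toList = h.toList.take 64 ++ ':' :: h.toList.drop 65 := by
      conv_lhs => rw [← List.take_append_drop 64 h.toList]
      rw [List.drop_eq_getElem_cons h64, hgetn]
    have hnocolon : ∀ (m : List Char),
        m.all (fun c => "0123456789abcdef".toList.contains c) = true → ':' ∉ m := by
      intro m hm hmem
      have hc := List.all_eq_true.mp hm ':' hmem
      simp at hc
    have hphex' : (h.toList.take 64).all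
        (fun c => "0123456789abcdef".toList.contains c) = true := by
      have ht : ((64 : Int)).toNat = (64 : Nat) := rfl
      rwa [ht] at hphex
    have hqhex' : (h.toList.drop 65).all
        (fun c => "0123456789abcdef".toList.contains c) = true := by
      have ht : ((65 : Int)).toNat = (65 : Nat) := rfl
      rwa [ht] at hqhex
    have hcp : ':' ∉ h.toList.take 64 := hnocolon _ hphex'
    have hcq : ':' ∉ h.toList.drop 65 := hnocolon _ hqhex'
    have hms : pvMsplit ':' h.toList [] = [h.toList.take 64, h.toList.drop 65] := by
      conv_lhs => rw [hdec]
      rw [pv_msplit_split ':' _ _ [] hcp, pv_msplit_no_sep ':' _ [] hcq]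
      simp
    have hin : PySem.Str.isIn ":" h = true := by
      rw [PySem.Str.isIn_eq]
      rw [PySem.Chars.isIn_iff_infix]
      exact ⟨h.toList.take 64, h.toList.drop 65, by simpa using hdec.symm⟩
    rw [if_pos hin, hms]
    have htk : (h.toList.take 64).length = 64 := by simp [hlen']
    have hdr : (h.toList.drop 65).length = 64 := by simp [hlen']
    simp only [List.map_cons, List.map_nil, List.length_cons, List.length_nil,
      List.all_cons, List.all_nil, String.toList_ofList, PySem.Str.len, htk, hdr]
    rw [if_pos (by norm_num)]
    simp only [Bool.and_eq_true, Bool.and_true]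
    exact ⟨⟨by simp, hphex'⟩, by simp, hqhex'⟩

-- ===== VERDICT (by name: the statement is the Claim_ definition above) =====
theorem validate_receipt_spec : Claim_equal_validate_receipt := by
  intro receipt _
  unfold Spec_validate_receipt validate_receipt validate_receipt_alt
  rcases ha : pvFirst? receipt "receipt_type" with _ | va <;>
  rcases hb : pvFirst? receipt "ts" with _ | vb <;>
  rcases hc : pvFirst? receipt "tenant_id" with _ | vc <;>
  rcases hd : pvFirst? receipt "payload_hash" with _ | vd <;>
    simp [ha, hb, hc, hd]
  simpa using pv_hash_eq vd
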